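-- pv_equiv track=rewrite | github.com/faserrao/c2m-api-v2-postman | finspect/finspect/zipscan.py | _infer_ooxml_type
-- ===== SOURCE A (Python) =====
-- from typing import List, Tuple, Optional, Union
--
-- OOXML_TYPES = {
--     'word/': 'application/vnd.openxmlformats-officedocument.wordprocessingml.document',
--     'xl/': 'application/vnd.openxmlformats-officedocument.spreadsheetml.sheet',
--     'ppt/': 'application/vnd.openxmlformats-officedocument.presentationml.presentation',
-- }
--
-- def _infer_ooxml_type(entries: List[str]) -> Optional[str]:
--     """Infer OOXML document type from entry names."""
--     has_content_types = '[Content_Types].xml' in entries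
--
--     if not has_content_types:
--         return None
--
--     for prefix, mime_type in OOXML_TYPES.items():
--         if any(entry.startswith(prefix) for entry in entries):
--             return mime_type
--
--     return None
-- ===== SOURCE B (Python) =====
-- from typing import List, Optional
--
-- OOXML_TYPES = {
--     'word/': 'application/vnd.openxmlformats-officedocument.wordprocessingml.document',
--     'xl/': 'application/vnd.openxmlformats-officedocument.spreadsheetml.sheet',
--     'ppt/': 'application/vnd.openxmlformats-officedocument.presentationml.presentation',
-- }
--
-- def _infer_ooxml_type(entries: List[str]) -> Optional[str]:
--     """Infer OOXML document type from entry names (single pass over entries)."""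
--     has_content_types = False
--     matched = set()
--     for entry in entries:
--         if entry == '[Content_Types].xml':
--             has_content_types = True
--         for prefix in OOXML_TYPES:
--             if entry.startswith(prefix):
--                 matched.add(prefix)
--     if not has_content_types:
--         return None
--     for prefix, mime_type in OOXML_TYPES.items():
--         if prefix in matched:
--             return mime_type
--     return None
-- ===== Notes on version B (the rewrite author's own statement) =====
-- stated objective: alternative
-- what changed: Replaces A's membership test plus up-to-three separate any() scans over entries with a single pass that accumulates the content-types flag and the set of matched prefixes, followed by a fixed-priority lookup in that set.
import Mathlib
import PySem

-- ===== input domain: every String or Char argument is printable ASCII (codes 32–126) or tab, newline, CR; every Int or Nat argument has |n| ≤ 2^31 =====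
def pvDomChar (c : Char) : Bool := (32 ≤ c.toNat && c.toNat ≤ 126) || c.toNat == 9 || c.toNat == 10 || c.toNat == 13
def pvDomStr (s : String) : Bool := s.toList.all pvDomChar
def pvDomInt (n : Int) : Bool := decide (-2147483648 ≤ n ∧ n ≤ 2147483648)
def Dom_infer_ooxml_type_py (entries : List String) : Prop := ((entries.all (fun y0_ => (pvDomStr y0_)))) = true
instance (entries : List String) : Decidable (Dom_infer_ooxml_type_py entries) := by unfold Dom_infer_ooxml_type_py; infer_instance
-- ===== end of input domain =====

set_option maxHeartbeats 400000


-- B does the same job as A in a single pass over entries (flag + matched-prefix set),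
-- then a fixed-priority lookup; A scans entries once per prefix. Alternative decomposition, same cost.

-- the module-level OOXML_TYPES table (insertion order), shared context of both programs
def ooxmlItems : List (String × String) :=
  [("word/", "application/vnd.openxmlformats-officedocument.wordprocessingml.document"),
   ("xl/", "application/vnd.openxmlformats-officedocument.spreadsheetml.sheet"),
   ("ppt/", "application/vnd.openxmlformats-officedocument.presentationml.presentation")]

-- ===== PORT A =====
-- A's 'for prefix, mime_type in OOXML_TYPES.items(): if any(...): return mime_type'
def aScan : List (String × String) → List String → Option String
  | [], _ => none
  | (pfx, mime) :: rest, entries =>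
    if entries.any (fun e => PySem.Str.startswith e pfx) then some mime else aScan rest entries

def infer_ooxml_type_py (entries : List String) : Option String :=
  let has_content_types := entries.contains "[Content_Types].xml"
  if !has_content_types then none
  else aScan ooxmlItems entries

-- ===== PORT B =====
-- B's loop body: update the flag and add every prefix this entry starts with to the set
def bStep (st : Bool × PySem.Set String) (entry : String) : Bool × PySem.Set String :=
  let hct := if entry == "[Content_Types].xml" then true else st.1
  let matched := (ooxmlItems.map Prod.fst).foldl
    (fun acc pfx => if PySem.Str.startswith entry pfx then PySem.Set.add acc pfx else acc) st.2
  (hct, matched)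

-- B's final priority scan: first table prefix present in the matched set
def bPriority : List (String × String) → PySem.Set String → Option String
  | [], _ => none
  | (pfx, mime) :: rest, matched =>
    if PySem.Set.contains matched pfx then some mime else bPriority rest matched

def infer_ooxml_type_py_alt (entries : List String) : Option String :=
  let st := entries.foldl bStep (false, PySem.Set.empty)
  if !st.1 then none
  else bPriority ooxmlItems st.2

-- ===== PRECONDITION & SPEC =====
def Spec_infer_ooxml_type_py (entries : List String) (out : Option String) : Prop := out = infer_ooxml_type_py_alt entries
instance (entries : List String) (out : Option String) : Decidable (Spec_infer_ooxml_type_py entries out) := by unfold Spec_infer_ooxml_type_py; infer_instance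

-- ===== CLAIM (what is proved, stated in full; the proofs are below) =====
def Claim_equal_infer_ooxml_type_py : Prop := ∀ (entries : List String), Dom_infer_ooxml_type_py entries → Spec_infer_ooxml_type_py entries (infer_ooxml_type_py entries)

-- ===== LEMMAS AND PROOFS =====

-- the flag component of B's fold is exactly A's membership test
lemma bFold_fst (entries : List String) (st : Bool × PySem.Set String) :
    (entries.foldl bStep st).1 = (st.1 || entries.contains "[Content_Types].xml") := by
  induction entries generalizing st with
  | nil => simp
  | cons e rest ih =>
    rw [List.foldl_cons, ih, List.contains_cons]
    simp only [bStep]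
    by_cases h : e = "[Content_Types].xml"
    · subst h
      simp only [beq_self_eq_true, if_true, Bool.true_or, Bool.or_true]
    · have hb1 : (e == "[Content_Types].xml") = false := beq_eq_false_iff_ne.mpr h
      have hb2 : (("[Content_Types].xml" : String) == e) = false := beq_eq_false_iff_ne.mpr (Ne.symm h)
      simp only [hb1, hb2, Bool.false_eq_true, if_false, Bool.false_or]

-- membership after the inner per-entry fold
lemma inner_mem (entry : String) (ps : List String) (acc : PySem.Set String) (p : String) :
    (p ∈ ps.foldl (fun acc pfx => if PySem.Str.startswith entry pfx then PySem.Set.add acc pfx else acc) acc)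
      ↔ (p ∈ acc ∨ (p ∈ ps ∧ PySem.Str.startswith entry p = true)) := by
  induction ps generalizing acc with
  | nil => simp
  | cons q rest ih =>
    simp only [List.foldl_cons]
    by_cases h : PySem.Str.startswith entry q = true
    · rw [if_pos h, ih]
      simp only [PySem.Set.mem_add, List.mem_cons]
      constructor
      · rintro (⟨hp | rfl⟩ | ⟨hp, hs⟩)
        · exact Or.inl hp
        · exact Or.inr ⟨Or.inl rfl, h⟩
        · exact Or.inr ⟨Or.inr hp, hs⟩
      · rintro (hp | ⟨hq | hp, hs⟩)
        · exact Or.inl (Or.inl hp)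
        · subst hq; exact Or.inl (Or.inr rfl)
        · exact Or.inr ⟨hp, hs⟩
    · rw [if_neg h, ih]
      simp only [List.mem_cons]
      constructor
      · rintro (hp | ⟨hp, hs⟩)
        · exact Or.inl hp
        · exact Or.inr ⟨Or.inr hp, hs⟩
      · rintro (hp | ⟨hq | hp, hs⟩)
        · exact Or.inl hp
        · exact absurd hs (by rw [hq]; exact h)
        · exact Or.inr ⟨hp, hs⟩

-- membership in the matched set after B's fold, for prefixes of the table
lemma bFold_snd_mem (entries : List String) (st : Bool × PySem.Set String) (p : String) :
    (p ∈ (entries.foldl bStep st).2)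
      ↔ (p ∈ st.2 ∨ (p ∈ ooxmlItems.map Prod.fst ∧ entries.any (fun e => PySem.Str.startswith e p))) := by
  induction entries generalizing st with
  | nil => simp
  | cons e rest ih =>
    rw [List.foldl_cons, ih]
    simp only [bStep, inner_mem, List.any_cons, Bool.or_eq_true]
    tauto

-- the two final scans agree once the matched set characterises any-startswith over the table
lemma scans_eq (entries : List String) (items : List (String × String)) (matched : PySem.Set String)
    (h : ∀ p ∈ items.map Prod.fst, (p ∈ matched ↔ entries.any (fun e => PySem.Str.startswith e p) = true)) :
    aScan items entries = bPriority items matched := by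
  induction items with
  | nil => rfl
  | cons pm rest ih =>
    obtain ⟨pfx, mime⟩ := pm
    have hp := h pfx (by simp)
    have hc : PySem.Set.contains matched pfx = entries.any (fun e => PySem.Str.startswith e pfx) := by
      by_cases hq : (entries.any fun e => PySem.Str.startswith e pfx) = true
      · rw [hq]; exact (PySem.Set.contains_iff matched pfx).mpr (hp.mpr hq)
      · simp only [Bool.not_eq_true] at hq
        rw [hq]
        refine Bool.eq_false_iff.mpr (fun hm => ?_)
        exact absurd (hq ▸ hp.mp ((PySem.Set.contains_iff matched pfx).mp hm)) (by decide)
    simp only [aScan, bPriority, hc]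
    split
    · rfl
    · exact ih (fun p hps => h p (List.mem_cons_of_mem _ hps))

-- ===== VERDICT (by name: the statement is the Claim_ definition above) =====
theorem infer_ooxml_type_py_spec : Claim_equal_infer_ooxml_type_py := by
  intro entries _
  show infer_ooxml_type_py entries = infer_ooxml_type_py_alt entries
  simp only [infer_ooxml_type_py, infer_ooxml_type_py_alt]
  rw [bFold_fst]
  by_cases h : entries.contains "[Content_Types].xml" = true
  · rw [h]
    simp only [Bool.false_or, Bool.not_true, Bool.false_eq_true, if_false]
    exact scans_eq entries ooxmlItems _ (fun p hps => by
      rw [bFold_snd_mem]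
      simp [PySem.Set.empty, hps])
  · simp only [Bool.not_eq_true] at h
    rw [h]
    simp
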